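-- pv_equiv track=rewrite | github.com/simonedaini/Miscellaneous | itop2.py | trace_to_path
-- ===== SOURCE A (Python) =====
-- def trace_to_path(path: list):
--
--     start = None
--     for i, p in enumerate(path):
--         if p["type"] == "A" and start == None:
--             start = i
--         if start != None and p["type"] == "R":
--             start = None
--
--     if start != None:
--         router = {
--             "type": "B",
--             "ip": "B"
--         }
--         path.insert(start, router)
--
--     if start != None:
--         for i in range(len(path)):
--             if i > start:
--                 path.pop()
--     return path
-- ===== SOURCE B (Python) =====
-- def trace_to_path(path: list):
--     # two passes: index of last "R" entry, then first "A" entry after it;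
--     # slice assignment truncates and appends the router in place
--     last_r = max((i for i, p in enumerate(path) if p["type"] == "R"), default=-1)
--     start = next((i for i, p in enumerate(path) if i > last_r and p["type"] == "A"), None)
--     if start is not None:
--         path[start:] = [{"type": "B", "ip": "B"}]
--     return path
-- ===== Notes on version B (the rewrite author's own statement) =====
-- stated objective: simpler
-- what changed: Replaces A's single stateful forward scan plus insert-then-pop-loop by a last-R reverse bound, a forward find of the first A after it, and one slice assignment path[start:] = [router].
import Mathlib
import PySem

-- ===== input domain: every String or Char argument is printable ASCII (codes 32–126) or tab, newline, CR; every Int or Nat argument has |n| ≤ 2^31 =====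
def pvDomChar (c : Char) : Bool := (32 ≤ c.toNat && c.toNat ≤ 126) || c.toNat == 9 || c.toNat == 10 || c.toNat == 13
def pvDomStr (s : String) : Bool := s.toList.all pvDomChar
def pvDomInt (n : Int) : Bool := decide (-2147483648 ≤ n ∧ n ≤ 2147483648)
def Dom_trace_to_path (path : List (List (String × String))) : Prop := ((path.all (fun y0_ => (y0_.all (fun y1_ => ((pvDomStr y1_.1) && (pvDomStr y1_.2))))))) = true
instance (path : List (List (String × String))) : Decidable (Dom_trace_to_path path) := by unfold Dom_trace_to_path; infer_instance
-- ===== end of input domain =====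

-- B replaces A's single stateful scan + insert/pop-loop by a last-"R" bound, a forward find of
-- the first "A" after it, and a single truncate-and-append; A and B both mutate `path` in place
-- in Python — the equivalence proved here is about the returned value.

-- p["type"] on an association-list dict: first match (none = KeyError)
def pvTypeOf (p : List (String × String)) : Option String :=
  (p.find? (fun q => q.1 == "type")).map (·.2)

-- ===== PORT A =====
def trace_to_path (path : List (List (String × String))) : List (List (String × String)) :=
  let start : Option Int :=
    (PySem.List.enumerate path 0).foldl (fun start ip =>
      let start := if pvTypeOf ip.2 = some "A" ∧ start = none then some ip.1 else start
      if start ≠ none ∧ pvTypeOf ip.2 = some "R" then none else start) none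
  match start with
  | none => path
  | some s =>
    let router : List (String × String) := [("type", "B"), ("ip", "B")]
    let path2 := PySem.List.insert path s router
    -- for i in range(len(path)): if i > start: path.pop()   (pop() on a non-empty list = dropLast;
    -- the list stays non-empty throughout, see the proof of the claim)
    (PySem.List.pyRange 0 path2.length 1).foldl
      (fun acc i => if s < i then acc.dropLast else acc) path2

-- ===== PORT B =====
def trace_to_path_alt (path : List (List (String × String))) : List (List (String × String)) :=
  -- max((i for i,p in enumerate(path) if p["type"]=="R"), default=-1)
  let lastR : Int :=
    (PySem.List.enumerate path 0).foldl
      (fun m ip => if pvTypeOf ip.2 = some "R" then max m ip.1 else m) (-1)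
  -- next((i for i,p in enumerate(path) if i > last_r and p["type"]=="A"), None)
  match (PySem.List.enumerate path 0).find?
      (fun ip => lastR < ip.1 ∧ pvTypeOf ip.2 = some "A") with
  | some ip => path.take ip.1.toNat ++ [[("type", "B"), ("ip", "B")]]   -- path[start:] = [router]
  | none => path

-- ===== PRECONDITION & SPEC =====
-- exactly the inputs where the Python A returns: every entry must carry a "type" key (else KeyError)
def Pre_trace_to_path (path : List (List (String × String))) : Prop :=
  ∀ p ∈ path, (pvTypeOf p).isSome
instance (path : List (List (String × String))) : Decidable (Pre_trace_to_path path) := by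
  unfold Pre_trace_to_path; infer_instance
def pvWitness_trace_to_path : (List (List (String × String))) :=
  [[("type", "A"), ("ip", "1")], [("type", "R"), ("ip", "2")], [("type", "A"), ("ip", "3")]]
def Spec_trace_to_path (path : List (List (String × String))) (out : List (List (String × String))) : Prop := out = trace_to_path_alt path
instance (path : List (List (String × String))) (out : List (List (String × String))) : Decidable (Spec_trace_to_path path out) := by unfold Spec_trace_to_path; infer_instance

-- ===== CLAIM (what is proved, stated in full; the proofs are below) =====
def Claim_equal_trace_to_path : Prop := ∀ (path : List (List (String × String))), Dom_trace_to_path path → Pre_trace_to_path path → Spec_trace_to_path path (trace_to_path path)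

-- ===== LEMMAS AND PROOFS =====

-- A's loop state after scanning xs
def tpA (xs : List (List (String × String))) : Option Int :=
  (PySem.List.enumerate xs 0).foldl (fun start ip =>
    let start := if pvTypeOf ip.2 = some "A" ∧ start = none then some ip.1 else start
    if start ≠ none ∧ pvTypeOf ip.2 = some "R" then none else start) none

-- B's last-R bound after scanning xs
def tpR (xs : List (List (String × String))) : Int :=
  (PySem.List.enumerate xs 0).foldl
    (fun m ip => if pvTypeOf ip.2 = some "R" then max m ip.1 else m) (-1)

theorem tpR_lt_len (xs : List (List (String × String))) : tpR xs < (xs.length : Int) := by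
  induction xs using List.reverseRecOn with
  | nil => simp [tpR, PySem.List.enumerate]
  | append_singleton xs x ih =>
    unfold tpR at *
    rw [PySem.List.enumerate_append]
    simp only [PySem.List.enumerate, List.foldl_append, List.foldl_cons, List.foldl_nil,
      List.length_append, List.length_cons, List.length_nil]
    split <;> push_cast <;> omega

theorem tpA_eq_find (xs : List (List (String × String))) :
    tpA xs = ((PySem.List.enumerate xs 0).find?
      (fun ip => tpR xs < ip.1 ∧ pvTypeOf ip.2 = some "A")).map (·.1) := by
  induction xs using List.reverseRecOn with
  | nil => simp [tpA, tpR, PySem.List.enumerate]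
  | append_singleton xs x ih =>
    have hlt := tpR_lt_len xs
    have hE : PySem.List.enumerate (xs ++ [x]) 0
        = PySem.List.enumerate xs 0 ++ [((xs.length : Int), x)] := by
      rw [PySem.List.enumerate_append]; simp [PySem.List.enumerate]
    have hbound : ∀ ip ∈ PySem.List.enumerate xs 0, ip.1 < (xs.length : Int) := by
      intro ip hip
      rw [PySem.List.mem_enumerate_iff] at hip
      obtain ⟨k, hk, rfl⟩ := hip
      simp; omega
    have hRnew : tpR (xs ++ [x])
        = if pvTypeOf x = some "R" then max (tpR xs) (xs.length : Int) else tpR xs := by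
      unfold tpR
      rw [hE, List.foldl_append]
      simp
    have hAnew : tpA (xs ++ [x])
        = (fun start (ip : Int × List (String × String)) =>
            let start := if pvTypeOf ip.2 = some "A" ∧ start = none then some ip.1 else start
            if start ≠ none ∧ pvTypeOf ip.2 = some "R" then none else start)
          (tpA xs) ((xs.length : Int), x) := by
      unfold tpA
      rw [hE, List.foldl_append]
      simp
    by_cases hR : pvTypeOf x = some "R"
    · -- new last R is the final element: nothing after it, result is none
      have hR' : tpR (xs ++ [x]) = (xs.length : Int) := by
        rw [hRnew, if_pos hR]; omega
      have hfind : (PySem.List.enumerate (xs ++ [x]) 0).find?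
          (fun ip => tpR (xs ++ [x]) < ip.1 ∧ pvTypeOf ip.2 = some "A") = none := by
        rw [List.find?_eq_none]
        intro ip hip
        rw [hE, List.mem_append] at hip
        rcases hip with hip | hip
        · have := hbound ip hip
          simp only [hR', decide_eq_true_eq, not_and]
          omega
        · simp only [List.mem_singleton] at hip
          subst hip
          simp [hR']
      rw [hfind, hAnew]
      rcases h : tpA xs with _ | s <;> simp [hR]
    · have hR' : tpR (xs ++ [x]) = tpR xs := by rw [hRnew, if_neg hR]
      rw [hAnew, hE, List.find?_append, hR']
      rcases h : tpA xs with _ | s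
      · -- no candidate yet: the appended element decides
        have hnone : (PySem.List.enumerate xs 0).find?
            (fun ip => tpR xs < ip.1 ∧ pvTypeOf ip.2 = some "A") = none := by
          rw [ih] at h
          exact Option.map_eq_none_iff.mp h
        rw [hnone]
        by_cases hA : pvTypeOf x = some "A" <;> simp [hA, hR, hlt]
      · have hsome : ∃ ip, (PySem.List.enumerate xs 0).find?
            (fun ip => tpR xs < ip.1 ∧ pvTypeOf ip.2 = some "A") = some ip ∧ ip.1 = s := by
          rw [ih] at h
          rcases Option.map_eq_some_iff.mp h with ⟨ip, hip, h1⟩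
          exact ⟨ip, hip, h1⟩
        obtain ⟨ip, hip, rfl⟩ := hsome
        rw [hip]
        simp [hR]

theorem dropLast_take_of_le {α : Type} (ys : List α) (k : Nat) (h : k ≤ ys.length) :
    (ys.take k).dropLast = ys.take (k - 1) := by
  rw [List.dropLast_eq_take, List.take_take, List.length_take]
  congr 1
  omega

-- the pop loop removes elements from the back, one for each index above s
theorem pop_loop_eq_take {α : Type} (s : Int) (hs : 0 ≤ s) (m : Nat) (ys : List α) :
    (PySem.List.pyRange 0 (m : Int) 1).foldl
      (fun acc i => if s < i then acc.dropLast else acc) ys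
    = ys.take (ys.length - (m - (s.toNat + 1))) := by
  induction m with
  | zero => simp
  | succ m ih =>
    have : ((m : Int) + 1) = ((m + 1 : Nat) : Int) := by push_cast; ring
    rw [← this, PySem.List.pyRange_one_succ_right (by positivity), List.foldl_append]
    rw [ih]
    simp only [List.foldl_cons, List.foldl_nil]
    by_cases hlt : s < (m : Int)
    · rw [if_pos hlt]
      rw [dropLast_take_of_le _ _ (by omega)]
      congr 1
      omega
    · rw [if_neg hlt]
      congr 1
      omega

theorem trace_to_path_eq_alt (path : List (List (String × String))) :
    trace_to_path path = trace_to_path_alt path := by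
  unfold trace_to_path trace_to_path_alt
  simp only [show (List.foldl (fun m (ip : Int × List (String × String)) =>
      if pvTypeOf ip.2 = some "R" then max m ip.1 else m) (-1)
      (PySem.List.enumerate path)) = tpR path from rfl]
  rw [show (List.foldl (fun start (ip : Int × List (String × String)) =>
      let start := if pvTypeOf ip.2 = some "A" ∧ start = none then some ip.1 else start
      if start ≠ none ∧ pvTypeOf ip.2 = some "R" then none else start) none
      (PySem.List.enumerate path)) = tpA path from rfl, tpA_eq_find]
  rcases hf : (PySem.List.enumerate path 0).find?
      (fun ip => tpR path < ip.1 ∧ pvTypeOf ip.2 = some "A") with _ | ip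
  · rw [show PySem.List.enumerate path = PySem.List.enumerate path 0 from rfl, hf]
    simp
  · rw [show PySem.List.enumerate path = PySem.List.enumerate path 0 from rfl, hf]
    simp only [Option.map_some]
    have hip := List.mem_of_find?_eq_some hf
    rw [PySem.List.mem_enumerate_iff] at hip
    obtain ⟨k, hk, rfl⟩ := hip
    simp only [zero_add]
    have hins : PySem.List.insert path ((k : Int)) [("type", "B"), ("ip", "B")]
        = path.take k ++ [("type", "B"), ("ip", "B")] :: path.drop k := by
      have := PySem.List.insert_natCast path k ([("type", "B"), ("ip", "B")]) (by omega)
      simpa using this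
    rw [hins]
    have hlen : (path.take k ++ [("type", "B"), ("ip", "B")] :: path.drop k).length
        = path.length + 1 := by simp
    rw [hlen]
    rw [pop_loop_eq_take (k : Int) (by positivity)]
    rw [hlen]
    have htn : ((k : Int)).toNat = k := by omega
    rw [htn]
    have hkk : path.length + 1 - (path.length + 1 - (k + 1)) = k + 1 := by omega
    rw [hkk]
    rw [show k + 1 = (path.take k).length + 1 from by simp; omega]
    rw [List.take_append]
    simp

-- ===== VERDICT (by name: the statement is the Claim_ definition above) =====
theorem trace_to_path_spec : Claim_equal_trace_to_path := by
  intro path _ _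
  unfold Spec_trace_to_path
  exact trace_to_path_eq_alt path
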